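-- pv_equiv track=rewrite | github.com/ronnix/jeux-de-programmation | 03-advent-of-code-2018/day-06/part1.py | has_infinite_area
-- ===== SOURCE A (Python) =====
-- def manhattan_distance(p1, p2):
--     x1, y1 = p1
--     x2, y2 = p2
--     return abs(x1 - x2) + abs(y1 - y2)
--
-- def grid_size(points):
--     return max(p[0] for p in points), max(p[1] for p in points)
--
-- def closest_locations(locations, coordinates):
--     distances = {
--         location: manhattan_distance(coordinates, location) for location in locations
--     }
--     shortest = min(distances.values())
--     return {
--         location for location, distance in distances.items() if distance == shortest
--     }
--
-- def has_infinite_area(locations, location):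
--     """
--     For any of the 4 directions, if the location is the closest to the point
--     at the edge of the grid in that direction, then it has in infinite area.
--     """
--     x_min, y_min = 0, 0
--     x_max, y_max = grid_size(locations)
--     x_loc, y_loc = location
--
--     up = (x_loc, y_min)
--     down = (x_loc, y_max)
--     left = (x_min, y_loc)
--     right = (x_max, y_loc)
--
--     return any(
--         closest_locations(locations, point) == {location}
--         for point in (up, down, left, right)
--     )
-- ===== SOURCE B (Python) =====
-- def manhattan(p1, p2):
--     x1, y1 = p1
--     x2, y2 = p2
--     return abs(x1 - x2) + abs(y1 - y2)
--
--
-- def has_infinite_area(locations, location):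
--     """A location has infinite area iff it is the strict unique closest
--     location to one of the 4 edge points in the 4 directions."""
--     if location not in locations:
--         return False
--     x_max = max(p[0] for p in locations)
--     y_max = max(p[1] for p in locations)
--     x_loc, y_loc = location
--     for point in ((x_loc, 0), (x_loc, y_max), (0, y_loc), (x_max, y_loc)):
--         d = manhattan(point, location)
--         if all(manhattan(point, other) > d for other in locations if other != location):
--             return True
--     return False
-- ===== Notes on version B (the rewrite author's own statement) =====
-- stated objective: simpler
-- what changed: Instead of building a location->distance dict, taking the min, forming the argmin set and comparing it to {location}, B checks membership once and then, per edge point, does a single strict-unique-minimizer scan (all other locations strictly farther).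
import Mathlib
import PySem

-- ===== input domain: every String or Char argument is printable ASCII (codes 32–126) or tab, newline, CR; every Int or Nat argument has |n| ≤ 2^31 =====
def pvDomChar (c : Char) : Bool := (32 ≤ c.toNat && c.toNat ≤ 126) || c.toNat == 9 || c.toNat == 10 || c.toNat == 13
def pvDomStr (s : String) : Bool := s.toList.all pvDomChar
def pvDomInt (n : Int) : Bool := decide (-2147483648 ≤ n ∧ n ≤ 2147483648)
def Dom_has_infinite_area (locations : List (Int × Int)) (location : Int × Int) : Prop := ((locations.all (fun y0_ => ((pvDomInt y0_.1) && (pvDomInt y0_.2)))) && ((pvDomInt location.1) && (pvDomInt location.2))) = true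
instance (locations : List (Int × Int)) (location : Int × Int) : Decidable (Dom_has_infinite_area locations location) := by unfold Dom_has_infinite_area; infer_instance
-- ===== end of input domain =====

-- B replaces A's dict / min / argmin-set construction by a single strict-unique-minimizer
-- scan per edge point (objective: simpler); return values agree on every nonempty locations list.

-- ===== PORT A =====
def manhattan_distance (p1 p2 : Int × Int) : Int :=
  |p1.1 - p2.1| + |p1.2 - p2.2|

-- max() of an empty generator raises ValueError in Python; Pre_ excludes locations = [],
-- so the .getD default is never reached on admitted inputs.
def grid_size (points : List (Int × Int)) : Int × Int :=
  ((PySem.List.max? (points.map Prod.fst) (fun v => v)).getD 0,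
   (PySem.List.max? (points.map Prod.snd) (fun v => v)).getD 0)

def closest_locations (locations : List (Int × Int)) (coordinates : Int × Int) : PySem.Set (Int × Int) :=
  let distances : PySem.Dict (Int × Int) Int :=
    locations.foldl (fun d loc => d.insert loc (manhattan_distance coordinates loc)) PySem.Dict.empty
  -- min() of an empty sequence raises ValueError; excluded by Pre_ (locations ≠ [])
  let shortest : Int := (PySem.List.min? distances.values (fun v => v)).getD 0
  PySem.Set.ofList
    (((distances.items).filter (fun p => p.2 == shortest)).map Prod.fst)

def has_infinite_area (locations : List (Int × Int)) (location : Int × Int) : Bool :=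
  let g := grid_size locations
  let up := (location.1, (0 : Int))
  let down := (location.1, g.2)
  let left := ((0 : Int), location.2)
  let right := (g.1, location.2)
  [up, down, left, right].any
    (fun point => PySem.Set.equal (closest_locations locations point) (PySem.Set.ofList [location]))

-- ===== PORT B =====
def pvB_manhattan (p1 p2 : Int × Int) : Int :=
  |p1.1 - p2.1| + |p1.2 - p2.2|

def has_infinite_area_alt (locations : List (Int × Int)) (location : Int × Int) : Bool :=
  if !(locations.contains location) then false
  else
    let x_max := (PySem.List.max? (locations.map Prod.fst) (fun v => v)).getD 0
    let y_max := (PySem.List.max? (locations.map Prod.snd) (fun v => v)).getD 0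
    [(location.1, (0 : Int)), (location.1, y_max), ((0 : Int), location.2), (x_max, location.2)].any
      (fun point =>
        let d := pvB_manhattan point location
        locations.all (fun other => other == location || decide (d < pvB_manhattan point other)))

-- ===== PRECONDITION & SPEC =====
-- Pre_ excludes only the empty list, on which A's max() raises ValueError.
def Pre_has_infinite_area (locations : List (Int × Int)) (location : Int × Int) : Prop :=
  locations ≠ []
instance (locations : List (Int × Int)) (location : Int × Int) : Decidable (Pre_has_infinite_area locations location) := by unfold Pre_has_infinite_area; infer_instance

def pvWitness_has_infinite_area : (List (Int × Int)) × (Int × Int) := ([(0, 0), (2, 3)], (0, 0))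

def Spec_has_infinite_area (locations : List (Int × Int)) (location : Int × Int) (out : Bool) : Prop := out = has_infinite_area_alt locations location
instance (locations : List (Int × Int)) (location : Int × Int) (out : Bool) : Decidable (Spec_has_infinite_area locations location out) := by unfold Spec_has_infinite_area; infer_instance

-- ===== CLAIM (what is proved, stated in full; the proofs are below) =====
def Claim_equal_has_infinite_area : Prop := ∀ (locations : List (Int × Int)) (location : Int × Int), Dom_has_infinite_area locations location → Pre_has_infinite_area locations location → Spec_has_infinite_area locations location (has_infinite_area locations location)

-- ===== LEMMAS AND PROOFS =====

-- lookup in closest_locations' distance dict after the build loop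
theorem pv_get?_foldl_insert (locations : List (Int × Int)) (c : Int × Int)
    (d0 : PySem.Dict (Int × Int) Int) (k : Int × Int) :
    (locations.foldl (fun d loc => d.insert loc (manhattan_distance c loc)) d0).get? k =
      if k ∈ locations then some (manhattan_distance c k) else d0.get? k := by
  induction locations generalizing d0 with
  | nil => simp
  | cons a t ih =>
    simp only [List.foldl_cons, ih, List.mem_cons]
    by_cases hk : k ∈ t
    · simp [hk]
    · by_cases hka : k = a
      · subst hka; simp [hk]
      · simp [hk, hka, PySem.Dict.get?_insert]

-- A's argmin set contains exactly the locations at minimal distance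
theorem pv_mem_closest (locations : List (Int × Int)) (hne : locations ≠ []) (c x : Int × Int) :
    x ∈ closest_locations locations c ↔
      x ∈ locations ∧ ∀ y ∈ locations, manhattan_distance c x ≤ manhattan_distance c y := by
  unfold closest_locations
  set f := manhattan_distance c with hf
  set d := locations.foldl (fun d loc => d.insert loc (f loc)) PySem.Dict.empty with hd
  have hkeys : d.keys = PySem.Set.ofList locations := by
    rw [hd, PySem.Dict.keys_foldl_insert]; rfl
  have hnd : d.keys.Nodup := by rw [hkeys]; exact PySem.Set.nodup_ofList _
  have hmemk : ∀ k, k ∈ d.keys ↔ k ∈ locations := by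
    intro k; rw [hkeys]; exact PySem.Set.mem_ofList _ _
  have hgetD : ∀ k ∈ locations, d.getD k 0 = f k := by
    intro k hk
    rw [PySem.Dict.getD_eq_get?_getD, hd, pv_get?_foldl_insert, if_pos hk]; rfl
  have hvals : d.values = d.keys.map (fun k => d.getD k 0) := PySem.Dict.values_eq_map_keys d hnd 0
  have hitems : d.items = d.keys.map (fun k => (k, d.getD k 0)) := PySem.Dict.items_eq_map_keys d hnd 0
  obtain ⟨m, hm⟩ : ∃ m, PySem.List.min? d.values (fun v => v) = some m := by
    cases hmin : PySem.List.min? d.values (fun v => v) with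
    | none =>
      exfalso
      rw [PySem.List.min?_eq_none_iff, hvals, List.map_eq_nil_iff] at hmin
      have := (hmemk (locations.head hne)).mpr (List.head_mem hne)
      rw [hmin] at this; exact absurd this (List.not_mem_nil)
    | some m => exact ⟨m, rfl⟩
  have hshort : (PySem.List.min? d.values (fun v => v)).getD 0 = m := by rw [hm]; rfl
  have hmin_le : ∀ y ∈ locations, m ≤ f y := by
    intro y hy
    have hv : d.getD y 0 ∈ d.values := by
      rw [hvals]; exact List.mem_map_of_mem ((hmemk y).mpr hy)
    have := PySem.List.min?_isMin hm _ hv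
    rwa [hgetD y hy] at this
  have hmem_m : ∃ k ∈ locations, f k = m := by
    have hv := PySem.List.min?_mem hm
    rw [hvals] at hv
    obtain ⟨k, hk, hkm⟩ := List.mem_map.mp hv
    exact ⟨k, (hmemk k).mp hk, by rw [← hgetD k ((hmemk k).mp hk), hkm]⟩
  simp only [hshort, PySem.Set.mem_ofList, List.mem_map, List.mem_filter, hitems]
  constructor
  · rintro ⟨⟨k, v⟩, ⟨⟨a, ha, haeq⟩, heq⟩, rfl⟩
    have h1 : a = k := congrArg Prod.fst haeq
    have h2 : d.getD a 0 = v := congrArg Prod.snd haeq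
    subst h1
    have hx : a ∈ locations := (hmemk a).mp ha
    have hfa : f a = m := by
      have h3 : v = m := by simpa using heq
      rw [← hgetD a hx, h2, h3]
    exact ⟨hx, fun y hy => hfa ▸ hmin_le y hy⟩
  · rintro ⟨hx, hmin'⟩
    have hfm : f x = m := by
      obtain ⟨k, hk, hkm⟩ := hmem_m
      exact le_antisymm (hkm ▸ hmin' k hk) (hmin_le x hx)
    exact ⟨(x, d.getD x 0), ⟨⟨x, (hmemk x).mpr hx, rfl⟩, by rw [hgetD x hx, hfm]; simp⟩, rfl⟩

-- per edge point: "argmin set == {location}" is "location present and strictly uniquely closest"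
theorem pv_point_eq (locations : List (Int × Int)) (hne : locations ≠ []) (location p : Int × Int) :
    PySem.Set.equal (closest_locations locations p) (PySem.Set.ofList [location]) =
      (locations.contains location &&
        locations.all (fun other =>
          other == location || decide (manhattan_distance p location < manhattan_distance p other))) := by
  apply Bool.coe_iff_coe.mp
  simp only [PySem.Set.equal, PySem.Set.issubset, Bool.and_eq_true, List.all_eq_true,
    PySem.Set.contains_iff, PySem.Set.mem_ofList, List.mem_singleton,
    Bool.or_eq_true, beq_iff_eq, decide_eq_true_iff, List.contains_eq_mem,
    pv_mem_closest locations hne p]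
  constructor
  · rintro ⟨hsub, hsup⟩
    obtain ⟨hlm, hmin⟩ := hsup location rfl
    refine ⟨hlm, fun other ho => ?_⟩
    by_cases hol : other = location
    · exact Or.inl hol
    · refine Or.inr (lt_of_le_of_ne (hmin other ho) fun hEq => ?_)
      exact hol (hsub other ⟨ho, fun y hy => hEq ▸ hmin y hy⟩)
  · rintro ⟨hlm, hstrict⟩
    have hminl : ∀ y ∈ locations, manhattan_distance p location ≤ manhattan_distance p y := by
      intro y hy
      rcases hstrict y hy with h | h
      · rw [h]
      · exact le_of_lt h
    refine ⟨fun x ⟨hx, hxmin⟩ => ?_, fun x hx => hx ▸ ⟨hlm, hminl⟩⟩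
    rcases hstrict x hx with h | h
    · exact h
    · exact absurd (hxmin location hlm) (not_le.mpr h)

-- ===== VERDICT (by name: the statement is the Claim_ definition above) =====
theorem has_infinite_area_spec : Claim_equal_has_infinite_area := by
  intro locations location _ hpre
  unfold Spec_has_infinite_area has_infinite_area has_infinite_area_alt grid_size
  simp only [pv_point_eq locations hpre location]
  cases hcon : locations.contains location <;>
    simp [pvB_manhattan, manhattan_distance]
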